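-- pv_equiv track=rewrite | github.com/butter76/butter-ai | projects/love-letter/utils/validate.py | generate_deck_from_draws
-- ===== SOURCE A (Python) =====
-- from typing import List, Dict, Optional, Tuple, cast
--
-- def generate_deck_from_draws(draws: List[int]) -> List[int]:
-- 	"""Generate a deck that starts with the given draw sequence"""
-- 	# Start with the draws we know
-- 	deck = draws[:]
--
-- 	# Get the standard deck
-- 	standard_deck = [
-- 		1,1,1,1,1,  # Guards (5)
-- 		2,2,        # Priests (2)
-- 		3,3,        # Barons (2)
-- 		4,4,        # Handmaids (2)
-- 		5,5,        # Princes (2)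
-- 		6,          # King (1)
-- 		7,          # Countess (1)
-- 		8           # Princess (1)
-- 	]
--
-- 	# Remove cards we've seen from the standard deck
-- 	for card in deck:
-- 		standard_deck.remove(card)
--
-- 	# Add remaining cards to complete the deck
-- 	deck.extend(standard_deck)
-- 	return deck[-1:] + deck[:-1]
-- ===== SOURCE B (Python) =====
-- def generate_deck_from_draws(draws):
-- 	"""Generate a deck that starts with the given draw sequence"""
-- 	# Remaining copies of each card value in the standard 16-card deck
-- 	STANDARD_COUNTS = {1: 5, 2: 2, 3: 2, 4: 2, 5: 2, 6: 1, 7: 1, 8: 1}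
-- 	remaining = []
-- 	for v in range(1, 9):
-- 		k = STANDARD_COUNTS[v] - draws.count(v)
-- 		if k < 0:
-- 			raise ValueError(f"more than {STANDARD_COUNTS[v]} copies of {v} drawn")
-- 		remaining.extend([v] * k)
-- 	if len(draws) + len(remaining) != 16:
-- 		raise ValueError("draw contains a card not in the standard deck")
-- 	deck = draws + remaining
-- 	return deck[-1:] + deck[:-1]
-- ===== Notes on version B (the rewrite author's own statement) =====
-- stated objective: idiomatic
-- what changed: B replaces A's per-card list.remove scans over the 16-card standard deck with a fixed count table: it counts each value 1..8 once in draws and emits the leftover copies in ascending order.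
import Mathlib
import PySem

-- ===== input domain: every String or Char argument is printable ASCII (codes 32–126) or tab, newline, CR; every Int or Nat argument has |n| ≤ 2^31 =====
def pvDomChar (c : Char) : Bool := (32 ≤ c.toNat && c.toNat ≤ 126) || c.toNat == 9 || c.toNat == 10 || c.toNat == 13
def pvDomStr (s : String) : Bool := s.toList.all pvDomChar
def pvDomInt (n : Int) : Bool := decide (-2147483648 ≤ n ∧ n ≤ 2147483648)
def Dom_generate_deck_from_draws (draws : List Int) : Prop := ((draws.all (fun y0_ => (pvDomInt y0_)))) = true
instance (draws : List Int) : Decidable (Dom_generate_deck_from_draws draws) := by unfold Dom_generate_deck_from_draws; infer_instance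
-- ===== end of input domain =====

-- B replaces A's repeated list.remove scans over the standard deck by counting each card value once
-- and emitting the leftover copies of 1..8 in ascending order (simpler; return-value equivalence).

-- ===== PORT A =====
-- for card in deck: standard_deck.remove(card)  — remove? returns none exactly where Python raises ValueError
def generate_deck_from_draws (draws : List Int) : List Int :=
  let deck := draws
  let standard_deck : List Int := [1,1,1,1,1,2,2,3,3,4,4,5,5,6,7,8]
  let remaining? : Option (List Int) :=
    deck.foldl (fun st card => st.bind (fun l => PySem.List.remove? l card)) (some standard_deck)
  let deck := deck ++ remaining?.getD []   -- `none` only outside Pre_ (Python raised before this point)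
  PySem.List.slice deck (some (-1)) none ++ PySem.List.slice deck none (some (-1))

-- ===== PORT B =====
-- Source B's two ValueError guards fire exactly outside Pre_ (over-drawn value / card not in 1..8)
-- and compute nothing on admitted inputs; the loop body is ported as-is ([v]*k with k < 0 is []
-- in Python, which is what Int.toNat gives).
def generate_deck_from_draws_alt (draws : List Int) : List Int :=
  let standard_counts : PySem.Dict Int Int := PySem.Dict.ofList [(1,5),(2,2),(3,2),(4,2),(5,2),(6,1),(7,1),(8,1)]
  let remaining := (PySem.List.pyRange 1 9 1).foldl
    (fun acc v => acc ++ List.replicate ((PySem.Dict.getD standard_counts v 0) - (draws.count v : Int)).toNat v) []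
  let deck := draws ++ remaining
  PySem.List.slice deck (some (-1)) none ++ PySem.List.slice deck none (some (-1))

-- ===== PRECONDITION & SPEC =====
-- Pre_ excludes exactly the draws on which A's list.remove raises ValueError:
-- a card value outside 1..8, or more copies of a value than the standard deck holds.
def Pre_generate_deck_from_draws (draws : List Int) : Prop :=
  draws.count 1 ≤ 5 ∧ draws.count 2 ≤ 2 ∧ draws.count 3 ≤ 2 ∧ draws.count 4 ≤ 2 ∧
  draws.count 5 ≤ 2 ∧ draws.count 6 ≤ 1 ∧ draws.count 7 ≤ 1 ∧ draws.count 8 ≤ 1 ∧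
  ∀ x ∈ draws, x = 1 ∨ x = 2 ∨ x = 3 ∨ x = 4 ∨ x = 5 ∨ x = 6 ∨ x = 7 ∨ x = 8
instance (draws : List Int) : Decidable (Pre_generate_deck_from_draws draws) := by
  unfold Pre_generate_deck_from_draws; infer_instance

def pvWitness_generate_deck_from_draws : List Int := [3, 1, 8, 1, 5]

def Spec_generate_deck_from_draws (draws : List Int) (out : List Int) : Prop := out = generate_deck_from_draws_alt draws
instance (draws : List Int) (out : List Int) : Decidable (Spec_generate_deck_from_draws draws out) := by unfold Spec_generate_deck_from_draws; infer_instance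

-- ===== CLAIM (what is proved, stated in full; the proofs are below) =====
def Claim_equal_generate_deck_from_draws : Prop := ∀ (draws : List Int), Dom_generate_deck_from_draws draws → Pre_generate_deck_from_draws draws → Spec_generate_deck_from_draws draws (generate_deck_from_draws draws)

-- ===== LEMMAS AND PROOFS =====

-- leftover of A's remove loop, with the option layer stripped
def eraseAll (ds l : List Int) : List Int := ds.foldl (fun xs c => xs.erase c) l

lemma eraseAll_nil (l : List Int) : eraseAll [] l = l := rfl
lemma eraseAll_cons (c : Int) (ds l : List Int) : eraseAll (c :: ds) l = eraseAll ds (l.erase c) := rfl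

lemma foldA_eq (ds : List Int) : ∀ (l : List Int), (∀ v, ds.count v ≤ l.count v) →
    ds.foldl (fun st card => st.bind (fun xs => PySem.List.remove? xs card)) (some l)
      = some (eraseAll ds l) := by
  induction ds with
  | nil => intro l _; rfl
  | cons c ds ih =>
      intro l h
      have hc : c ∈ l := by
        have := h c
        simp [List.count_cons_self] at this
        exact List.count_pos_iff.mp (by omega)
      simp only [List.foldl_cons, Option.bind_some, PySem.List.remove?_eq_some_erase _ _ hc,
        eraseAll_cons]
      refine ih _ ?_
      intro v
      have hv := h v
      rw [List.count_erase]
      simp only [List.count_cons, beq_iff_eq] at hv ⊢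
      split_ifs at hv ⊢ <;> omega

lemma count_eraseAll (ds : List Int) : ∀ (l : List Int) (v : Int),
    (eraseAll ds l).count v = l.count v - ds.count v := by
  induction ds with
  | nil => intro l v; simp [eraseAll_nil]
  | cons c ds ih =>
      intro l v
      rw [eraseAll_cons, ih, List.count_erase, List.count_cons]
      by_cases h : v = c <;> simp [h] <;> omega

lemma sorted_eraseAll (ds : List Int) : ∀ (l : List Int),
    l.Pairwise (· ≤ ·) → (eraseAll ds l).Pairwise (· ≤ ·) := by
  induction ds with
  | nil => intro l h; exact h
  | cons c ds ih =>
      intro l h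
      rw [eraseAll_cons]
      exact ih _ (List.Pairwise.sublist (List.erase_sublist) h)

-- ===== VERDICT (by name: the statement is the Claim_ definition above) =====
set_option maxHeartbeats 2000000 in
theorem generate_deck_from_draws_spec : Claim_equal_generate_deck_from_draws := by
  intro draws hdom hpre
  obtain ⟨h1, h2, h3, h4, h5, h6, h7, h8, hmem⟩ := hpre
  have hsub : ∀ v : Int, draws.count v ≤ ([1,1,1,1,1,2,2,3,3,4,4,5,5,6,7,8] : List Int).count v := by
    intro v
    by_cases hv : v ∈ draws
    · rcases hmem v hv with rfl | rfl | rfl | rfl | rfl | rfl | rfl | rfl <;>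
        simp_all
    · rw [List.count_eq_zero_of_not_mem hv]; omega
  simp only [Spec_generate_deck_from_draws, generate_deck_from_draws, generate_deck_from_draws_alt]
  rw [foldA_eq draws _ hsub]
  have key : eraseAll draws [1,1,1,1,1,2,2,3,3,4,4,5,5,6,7,8] =
      (PySem.List.pyRange 1 9 1).foldl
        (fun acc v => acc ++ List.replicate
          ((PySem.Dict.getD (PySem.Dict.ofList [(1,5),(2,2),(3,2),(4,2),(5,2),(6,1),(7,1),(8,1)]) v 0)
            - (draws.count v : Int)).toNat v) [] := by
    have hrange : PySem.List.pyRange 1 9 1 = [1,2,3,4,5,6,7,8] := by decide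
    rw [hrange]
    simp only [List.foldl_cons, List.foldl_nil, List.nil_append]
    rw [(by decide : (PySem.Dict.ofList [((1:Int),(5:Int)),(2,2),(3,2),(4,2),(5,2),(6,1),(7,1),(8,1)]).getD 1 0 = 5),
        (by decide : (PySem.Dict.ofList [((1:Int),(5:Int)),(2,2),(3,2),(4,2),(5,2),(6,1),(7,1),(8,1)]).getD 2 0 = 2),
        (by decide : (PySem.Dict.ofList [((1:Int),(5:Int)),(2,2),(3,2),(4,2),(5,2),(6,1),(7,1),(8,1)]).getD 3 0 = 2),
        (by decide : (PySem.Dict.ofList [((1:Int),(5:Int)),(2,2),(3,2),(4,2),(5,2),(6,1),(7,1),(8,1)]).getD 4 0 = 2),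
        (by decide : (PySem.Dict.ofList [((1:Int),(5:Int)),(2,2),(3,2),(4,2),(5,2),(6,1),(7,1),(8,1)]).getD 5 0 = 2),
        (by decide : (PySem.Dict.ofList [((1:Int),(5:Int)),(2,2),(3,2),(4,2),(5,2),(6,1),(7,1),(8,1)]).getD 6 0 = 1),
        (by decide : (PySem.Dict.ofList [((1:Int),(5:Int)),(2,2),(3,2),(4,2),(5,2),(6,1),(7,1),(8,1)]).getD 7 0 = 1),
        (by decide : (PySem.Dict.ofList [((1:Int),(5:Int)),(2,2),(3,2),(4,2),(5,2),(6,1),(7,1),(8,1)]).getD 8 0 = 1)]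
    refine List.Perm.eq_of_pairwise (le := (· ≤ ·)) (fun a b _ _ hab hba => le_antisymm hab hba)
      (sorted_eraseAll draws _ (by decide)) ?_ (List.perm_iff_count.mpr ?_)
    · -- the concatenation of replicates of 1,…,8 is Pairwise (· ≤ ·)
      simp only [List.pairwise_append, List.pairwise_replicate, List.mem_append,
        List.mem_replicate]
      refine ⟨⟨⟨⟨⟨⟨⟨?_, ?_, ?_⟩, ?_, ?_⟩, ?_, ?_⟩, ?_, ?_⟩, ?_, ?_⟩, ?_, ?_⟩, ?_, ?_⟩ <;>
        first
          | omega
          | (intro a ha b hb; omega)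
    · intro a
      rw [count_eraseAll]
      simp only [List.count_append, List.count_replicate, beq_iff_eq]
      rcases (by omega : a = 1 ∨ a = 2 ∨ a = 3 ∨ a = 4 ∨ a = 5 ∨ a = 6 ∨ a = 7 ∨ a = 8 ∨
          (a ≠ 1 ∧ a ≠ 2 ∧ a ≠ 3 ∧ a ≠ 4 ∧ a ≠ 5 ∧ a ≠ 6 ∧ a ≠ 7 ∧ a ≠ 8)) with
        rfl | rfl | rfl | rfl | rfl | rfl | rfl | rfl | ⟨n1,n2,n3,n4,n5,n6,n7,n8⟩
      · rw [(by decide : ([1,1,1,1,1,2,2,3,3,4,4,5,5,6,7,8] : List Int).count 1 = 5)]; norm_num <;> omega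
      · rw [(by decide : ([1,1,1,1,1,2,2,3,3,4,4,5,5,6,7,8] : List Int).count 2 = 2)]; norm_num <;> omega
      · rw [(by decide : ([1,1,1,1,1,2,2,3,3,4,4,5,5,6,7,8] : List Int).count 3 = 2)]; norm_num <;> omega
      · rw [(by decide : ([1,1,1,1,1,2,2,3,3,4,4,5,5,6,7,8] : List Int).count 4 = 2)]; norm_num <;> omega
      · rw [(by decide : ([1,1,1,1,1,2,2,3,3,4,4,5,5,6,7,8] : List Int).count 5 = 2)]; norm_num <;> omega
      · rw [(by decide : ([1,1,1,1,1,2,2,3,3,4,4,5,5,6,7,8] : List Int).count 6 = 1)]; norm_num <;> omega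
      · rw [(by decide : ([1,1,1,1,1,2,2,3,3,4,4,5,5,6,7,8] : List Int).count 7 = 1)]; norm_num <;> omega
      · rw [(by decide : ([1,1,1,1,1,2,2,3,3,4,4,5,5,6,7,8] : List Int).count 8 = 1)]; norm_num <;> omega
      · have hzs : ([1,1,1,1,1,2,2,3,3,4,4,5,5,6,7,8] : List Int).count a = 0 := by
          rw [List.count_eq_zero]
          intro hm
          simp only [List.mem_cons, List.not_mem_nil, or_false] at hm
          omega
        have hz : draws.count a = 0 := by
          rw [List.count_eq_zero]
          intro hmem'
          rcases hmem a hmem' with rfl|rfl|rfl|rfl|rfl|rfl|rfl|rfl <;> omega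
        rw [hzs, hz, if_neg (fun h => n1 h.symm), if_neg (fun h => n2 h.symm),
          if_neg (fun h => n3 h.symm), if_neg (fun h => n4 h.symm), if_neg (fun h => n5 h.symm),
          if_neg (fun h => n6 h.symm), if_neg (fun h => n7 h.symm), if_neg (fun h => n8 h.symm)]
  rw [key]
  simp only [Option.getD_some]
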